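-- pv_equiv track=rewrite | github.com/yuanLink/Operation-Homework | pageStrategy.py | readPage
-- ===== SOURCE A (Python) =====
-- def readPage(page):
-- 	for each in page:
-- 		if page[each] == 0:
-- 			return each
-- 		page[each] = 0
--
-- 	for each in page:
-- 		if page[each] == 0:
-- 			return each
-- ===== SOURCE B (Python) =====
-- def readPage(page):
--     # Declarative filter-then-head: collect all zero-valued keys up front and take
--     # the first, falling back to the dict's first key. Return-value equivalence only:
--     # B does not reproduce A's in-place zeroing of page.
--     zeros = [k for k, v in page.items() if v == 0]
--     if zeros:
--         return zeros[0]
--     return next(iter(page), None)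
-- ===== Notes on version B (the rewrite author's own statement) =====
-- stated objective: idiomatic
-- what changed: Replaces A's mutating early-return scan plus second re-scan with a declarative filter-then-head: build the list of zero-valued keys once and take its first element, falling back to the dict's first key; B does not mutate the dict (return-value equivalence).
import Mathlib
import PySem

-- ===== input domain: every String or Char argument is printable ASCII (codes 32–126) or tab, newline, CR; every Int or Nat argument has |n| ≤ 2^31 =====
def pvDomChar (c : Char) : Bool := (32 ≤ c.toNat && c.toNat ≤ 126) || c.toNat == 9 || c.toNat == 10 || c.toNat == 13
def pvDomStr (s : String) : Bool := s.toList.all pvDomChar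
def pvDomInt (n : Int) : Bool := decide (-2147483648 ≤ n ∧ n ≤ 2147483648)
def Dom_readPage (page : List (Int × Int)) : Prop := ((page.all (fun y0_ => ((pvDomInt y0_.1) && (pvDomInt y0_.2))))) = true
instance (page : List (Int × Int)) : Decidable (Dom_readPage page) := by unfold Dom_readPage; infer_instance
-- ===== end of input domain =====

-- B replaces A's mutating early-return scan with a declarative filter-then-head; return-value
-- equivalence only (A zeroes dict values in place up to the first zero, B does not mutate).

-- ===== PORT A =====
-- second loop of A: scan the (mutated) dict's keys for a zero value
def readPageScan2 : List Int → PySem.Dict Int Int → Option Int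
  | [], _ => none
  | k :: ks, d => if d.getD k 0 = 0 then some k else readPageScan2 ks d

-- first loop of A: return a zero-valued key, else zero it and go on; when exhausted, run the second loop
def readPageScan1 : List Int → PySem.Dict Int Int → Option Int
  | [], d => readPageScan2 d.keys d
  | k :: ks, d => if d.getD k 0 = 0 then some k else readPageScan1 ks (d.insert k 0)

def readPage (page : List (Int × Int)) : Option Int :=
  let d := PySem.Dict.ofList page
  readPageScan1 d.keys d

-- ===== PORT B =====
-- zeros = [k for k, v in page.items() if v == 0]; zeros[0] if zeros else next(iter(page), None)
def readPage_alt (page : List (Int × Int)) : Option Int :=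
  let d := PySem.Dict.ofList page
  let zeros := (d.items.filter (fun kv => kv.2 == 0)).map Prod.fst
  match zeros.head? with
  | some k => some k
  | none => d.keys.head?

-- ===== PRECONDITION & SPEC =====
def Spec_readPage (page : List (Int × Int)) (out : Option Int) : Prop := out = readPage_alt page
instance (page : List (Int × Int)) (out : Option Int) : Decidable (Spec_readPage page out) := by unfold Spec_readPage; infer_instance

-- ===== CLAIM (what is proved, stated in full; the proofs are below) =====
def Claim_equal_readPage : Prop := ∀ (page : List (Int × Int)), Dom_readPage page → Spec_readPage page (readPage page)

-- ===== LEMMAS AND PROOFS =====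

-- Once the first key h is remembered and already zeroed, A's remaining scan is a pure find?
-- over the original values, defaulting to h.
lemma readPage_scan1_char (t : List Int) (h : Int) :
    ∀ d : PySem.Dict Int Int, d.keys.head? = some h → d.getD h 0 = 0 → h ∉ t → t.Nodup →
      (∀ k ∈ t, d.contains k = true) →
      readPageScan1 t d =
        (match t.find? (fun x => d.getD x 0 == 0) with
         | some x => some x
         | none => some h) := by
  induction t with
  | nil =>
    intro d hhead hzero _ _ _
    cases hk : d.keys with
    | nil => simp [hk] at hhead
    | cons a t =>
      have ha : a = h := by simpa [hk] using hhead
      subst ha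
      simp [readPageScan1, readPageScan2, hk, hzero]
  | cons k ks ih =>
    intro d hhead hzero hnotin hnd hcont
    have hkh : h ≠ k := by
      intro e; exact hnotin (e ▸ List.mem_cons_self ..)
    have hknks : k ∉ ks := (List.nodup_cons.mp hnd).1
    by_cases hz : d.getD k 0 = 0
    · simp [readPageScan1, hz]
    · have hck : d.contains k = true := hcont k (List.mem_cons_self ..)
      have hkeys : (d.insert k 0).keys = d.keys := PySem.Dict.keys_insert_of_contains d 0 hck
      have step := ih (d.insert k 0)
        (by rw [hkeys]; exact hhead)
        (by rw [PySem.Dict.getD_insert_of_ne d 0 0 hkh]; exact hzero)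
        (fun e => hnotin (List.mem_cons_of_mem _ e))
        (List.nodup_cons.mp hnd).2
        (by
          intro k' hk'
          rw [PySem.Dict.contains_insert d k k' 0]
          simp [hcont k' (List.mem_cons_of_mem _ hk')])
      have hfind : ks.find? (fun x => (d.insert k 0).getD x 0 == 0)
          = ks.find? (fun x => d.getD x 0 == 0) := by
        rw [← List.head?_filter, ← List.head?_filter]
        congr 1
        apply List.filter_congr
        intro x hx
        have hxk : x ≠ k := fun e => hknks (e ▸ hx)
        rw [PySem.Dict.getD_insert_of_ne d 0 0 hxk]
      rw [hfind] at step
      simp [readPageScan1, hz, step]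

-- B's filter over items equals a find? over the keys with the dict's values.
lemma readPage_alt_char (page : List (Int × Int)) :
    readPage_alt page =
      (let d := PySem.Dict.ofList page
       match d.keys.find? (fun x => d.getD x 0 == 0) with
       | some k => some k
       | none => d.keys.head?) := by
  unfold readPage_alt
  have hnd : (PySem.Dict.ofList page).keys.Nodup := PySem.Dict.nodup_keys_ofList page
  have hitems := PySem.Dict.items_eq_map_keys (PySem.Dict.ofList page) hnd 0
  simp only [hitems, List.filter_map, ← List.head?_filter, List.head?_map, Function.comp_def]
  cases hfz : ((PySem.Dict.ofList page).keys.filter (fun x => (PySem.Dict.ofList page).getD x 0 == 0)).head? <;>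
    simp

lemma readPage_eq_alt (page : List (Int × Int)) : readPage page = readPage_alt page := by
  rw [readPage_alt_char]
  unfold readPage
  set d := PySem.Dict.ofList page with hd
  have hnd : d.keys.Nodup := PySem.Dict.nodup_keys_ofList page
  cases hk : d.keys with
  | nil => simp [readPageScan1, readPageScan2, hk]
  | cons k t =>
    have hck : d.contains k = true := by
      rw [PySem.Dict.contains_iff_mem_keys]; simp [hk]
    rw [hk] at hnd
    by_cases hz : d.getD k 0 = 0
    · simp [readPageScan1, hk, hz]
    · have hknt : k ∉ t := (List.nodup_cons.mp hnd).1
      have step := readPage_scan1_char t k (d.insert k 0)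
        (by rw [PySem.Dict.keys_insert_of_contains d 0 hck, hk]; rfl)
        (by rw [PySem.Dict.getD_insert_self d k 0 0])
        hknt
        (List.nodup_cons.mp hnd).2
        (by
          intro k' hk'
          rw [PySem.Dict.contains_insert d k k' 0]
          have : d.contains k' = true := by
            rw [PySem.Dict.contains_iff_mem_keys]; rw [hk]; exact List.mem_cons_of_mem _ hk'
          simp [this])
      have hfind : t.find? (fun x => (d.insert k 0).getD x 0 == 0)
          = t.find? (fun x => d.getD x 0 == 0) := by
        rw [← List.head?_filter, ← List.head?_filter]
        congr 1
        apply List.filter_congr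
        intro x hx
        have hxk : x ≠ k := fun e => hknt (e ▸ hx)
        rw [PySem.Dict.getD_insert_of_ne d 0 0 hxk]
      rw [hfind] at step
      simp [readPageScan1, hk, hz, step]

-- ===== VERDICT (by name: the statement is the Claim_ definition above) =====
theorem readPage_spec : Claim_equal_readPage := by
  intro page _
  unfold Spec_readPage
  exact readPage_eq_alt page
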